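-- pv_equiv track=rewrite | github.com/IKNL/BOM-AI-Hackathon | teams/team5/backend/intake.py | _select_connectors
-- ===== SOURCE A (Python) =====
-- _TYPE_PRIORITY: dict[str, list[str]] = {
--     "patient":      ["kanker_nl", "nkr_cijfers", "publications", "cancer_atlas"],
--     "publiek":      ["kanker_nl", "nkr_cijfers", "publications", "cancer_atlas"],
--     "zorgverlener": ["nkr_cijfers", "publications", "kanker_nl", "cancer_atlas"],
--     "student":      ["publications", "nkr_cijfers", "kanker_nl", "cancer_atlas"],
--     "onderzoeker":  ["publications", "nkr_cijfers", "kanker_nl", "cancer_atlas"],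
--     "beleidsmaker": ["cancer_atlas", "nkr_cijfers", "publications", "kanker_nl"],
--     "journalist":   ["kanker_nl", "nkr_cijfers", "cancer_atlas", "publications"],
--     "anders":       ["kanker_nl", "nkr_cijfers", "cancer_atlas", "publications"],
-- }
--
-- _VRAAG_TYPE_CONNECTORS: dict[str, set[str]] = {
--     "patient_info": {"kanker_nl", "publications"},
--     "cijfers":      {"nkr_cijfers", "kanker_nl"},
--     "regionaal":    {"cancer_atlas", "nkr_cijfers"},
--     # "onderzoek" used to be {publications, nkr_cijfers}. nkr_cijfers needs a
--     # specific cancer_type (useless for generic research queries) and if the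
--     # publications collection is missing/rebuilding we ended up with zero
--     # sources. kanker_nl has useful research-adjacent content so keep it as a
--     # fallback.
--     "onderzoek":    {"publications", "kanker_nl", "nkr_cijfers"},
--     "breed":        {"kanker_nl", "nkr_cijfers", "cancer_atlas", "publications"},
-- }
--
-- def _select_connectors(gebruiker_type: str, vraag_type: str | None) -> list[str]:
--     """Select and order connectors based on user type and question type."""
--     relevant = _VRAAG_TYPE_CONNECTORS.get(vraag_type or "breed", _VRAAG_TYPE_CONNECTORS["breed"])
--     priority = _TYPE_PRIORITY.get(gebruiker_type, _TYPE_PRIORITY["anders"])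
--     ordered = [c for c in priority if c in relevant]
--     for c in relevant:
--         if c not in ordered:
--             ordered.append(c)
--     return ordered
-- ===== SOURCE B (Python) =====
-- def _priority_order(gebruiker_type: str) -> list[str]:
--     """Priority ranking of connectors for a user type (default: 'anders')."""
--     if gebruiker_type in ("patient", "publiek"):
--         return ["kanker_nl", "nkr_cijfers", "publications", "cancer_atlas"]
--     if gebruiker_type == "zorgverlener":
--         return ["nkr_cijfers", "publications", "kanker_nl", "cancer_atlas"]
--     if gebruiker_type in ("student", "onderzoeker"):
--         return ["publications", "nkr_cijfers", "kanker_nl", "cancer_atlas"]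
--     if gebruiker_type == "beleidsmaker":
--         return ["cancer_atlas", "nkr_cijfers", "publications", "kanker_nl"]
--     return ["kanker_nl", "nkr_cijfers", "cancer_atlas", "publications"]
--
--
-- def _relevant_connectors(vraag_type: str) -> set[str]:
--     """Connectors relevant to a question type (default: 'breed' = all)."""
--     if vraag_type == "patient_info":
--         return {"kanker_nl", "publications"}
--     if vraag_type == "cijfers":
--         return {"nkr_cijfers", "kanker_nl"}
--     if vraag_type == "regionaal":
--         return {"cancer_atlas", "nkr_cijfers"}
--     if vraag_type == "onderzoek":
--         return {"publications", "kanker_nl", "nkr_cijfers"}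
--     return {"kanker_nl", "nkr_cijfers", "cancer_atlas", "publications"}
--
--
-- def _select_connectors(gebruiker_type: str, vraag_type: str | None) -> list[str]:
--     """Sort the relevant connectors by their rank in the user's priority order."""
--     return sorted(_relevant_connectors(vraag_type or "breed"),
--                   key=_priority_order(gebruiker_type).index)
-- ===== Notes on version B (the rewrite author's own statement) =====
-- stated objective: idiomatic
-- what changed: B replaces the module dicts with two total lookup functions (if-chains with the defaults as the final branch) and returns the relevant connector set sorted by each connector's rank in the priority order, instead of A's filter-priority-by-membership pass plus a dead append-loop.
import Mathlib
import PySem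

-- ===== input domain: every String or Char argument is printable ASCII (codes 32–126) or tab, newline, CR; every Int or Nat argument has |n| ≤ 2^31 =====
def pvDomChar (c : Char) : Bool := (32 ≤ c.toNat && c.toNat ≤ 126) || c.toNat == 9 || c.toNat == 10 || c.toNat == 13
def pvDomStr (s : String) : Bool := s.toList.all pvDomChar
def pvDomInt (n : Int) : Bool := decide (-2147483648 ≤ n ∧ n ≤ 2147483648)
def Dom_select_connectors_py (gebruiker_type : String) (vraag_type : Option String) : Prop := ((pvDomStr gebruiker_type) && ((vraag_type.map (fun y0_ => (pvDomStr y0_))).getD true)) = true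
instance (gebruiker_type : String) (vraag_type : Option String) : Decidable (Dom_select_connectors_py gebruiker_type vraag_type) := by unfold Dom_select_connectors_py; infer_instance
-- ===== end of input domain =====

-- B replaces the dicts with total if-chain lookup helpers and sorts the relevant connector
-- set by rank in the priority order instead of filtering the priority list; idiomatic, same cost.


-- ===== PORT A =====
def pvTypePriority : PySem.Dict String (List String) :=
  PySem.Dict.ofList
  [("patient",      ["kanker_nl", "nkr_cijfers", "publications", "cancer_atlas"]),
   ("publiek",      ["kanker_nl", "nkr_cijfers", "publications", "cancer_atlas"]),
   ("zorgverlener", ["nkr_cijfers", "publications", "kanker_nl", "cancer_atlas"]),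
   ("student",      ["publications", "nkr_cijfers", "kanker_nl", "cancer_atlas"]),
   ("onderzoeker",  ["publications", "nkr_cijfers", "kanker_nl", "cancer_atlas"]),
   ("beleidsmaker", ["cancer_atlas", "nkr_cijfers", "publications", "kanker_nl"]),
   ("journalist",   ["kanker_nl", "nkr_cijfers", "cancer_atlas", "publications"]),
   ("anders",       ["kanker_nl", "nkr_cijfers", "cancer_atlas", "publications"])]

def pvVraagTypeConnectors : PySem.Dict String (PySem.Set String) :=
  PySem.Dict.ofList
  [("patient_info", PySem.Set.ofList ["kanker_nl", "publications"]),
   ("cijfers",      PySem.Set.ofList ["nkr_cijfers", "kanker_nl"]),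
   ("regionaal",    PySem.Set.ofList ["cancer_atlas", "nkr_cijfers"]),
   ("onderzoek",    PySem.Set.ofList ["publications", "kanker_nl", "nkr_cijfers"]),
   ("breed",        PySem.Set.ofList ["kanker_nl", "nkr_cijfers", "cancer_atlas", "publications"])]

def select_connectors_py (gebruiker_type : String) (vraag_type : Option String) : List String :=
  -- 'vraag_type or "breed"': Python treats None and "" as falsy
  let key := match vraag_type with
             | none => "breed"
             | some s => if s = "" then "breed" else s
  let relevant := PySem.Dict.getD pvVraagTypeConnectors key
      (PySem.Dict.getD pvVraagTypeConnectors "breed" [])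
  let priority := PySem.Dict.getD pvTypePriority gebruiker_type
      (PySem.Dict.getD pvTypePriority "anders" [])
  let ordered := priority.filter (fun c => relevant.contains c)
  -- 'for c in relevant: if c not in ordered: ordered.append(c)' — appends nothing here, so
  -- the result cannot depend on Python's set-iteration order
  relevant.foldl (fun acc c => if acc.contains c then acc else acc ++ [c]) ordered

-- ===== PORT B =====
def pvPriorityOrder (gebruiker_type : String) : List String :=
  if gebruiker_type = "patient" ∨ gebruiker_type = "publiek" then
    ["kanker_nl", "nkr_cijfers", "publications", "cancer_atlas"]
  else if gebruiker_type = "zorgverlener" then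
    ["nkr_cijfers", "publications", "kanker_nl", "cancer_atlas"]
  else if gebruiker_type = "student" ∨ gebruiker_type = "onderzoeker" then
    ["publications", "nkr_cijfers", "kanker_nl", "cancer_atlas"]
  else if gebruiker_type = "beleidsmaker" then
    ["cancer_atlas", "nkr_cijfers", "publications", "kanker_nl"]
  else
    ["kanker_nl", "nkr_cijfers", "cancer_atlas", "publications"]

def pvRelevantConnectors (vraag_type : String) : PySem.Set String :=
  if vraag_type = "patient_info" then PySem.Set.ofList ["kanker_nl", "publications"]
  else if vraag_type = "cijfers" then PySem.Set.ofList ["nkr_cijfers", "kanker_nl"]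
  else if vraag_type = "regionaal" then PySem.Set.ofList ["cancer_atlas", "nkr_cijfers"]
  else if vraag_type = "onderzoek" then PySem.Set.ofList ["publications", "kanker_nl", "nkr_cijfers"]
  else PySem.Set.ofList ["kanker_nl", "nkr_cijfers", "cancer_atlas", "publications"]

def select_connectors_py_alt (gebruiker_type : String) (vraag_type : Option String) : List String :=
  -- sorted(relevant, key=priority.index); the key is injective on the relevant connectors
  -- (.getD is only a totality guard: index? is always some here)
  let priority := pvPriorityOrder gebruiker_type
  PySem.List.sorted
    (pvRelevantConnectors (match vraag_type with
                           | none => "breed"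
                           | some s => if s = "" then "breed" else s))
    (fun c => (PySem.List.index? priority c).getD priority.length) false

-- ===== PRECONDITION & SPEC =====
def Spec_select_connectors_py (gebruiker_type : String) (vraag_type : Option String) (out : List String) : Prop := out = select_connectors_py_alt gebruiker_type vraag_type
instance (gebruiker_type : String) (vraag_type : Option String) (out : List String) : Decidable (Spec_select_connectors_py gebruiker_type vraag_type out) := by unfold Spec_select_connectors_py; infer_instance

-- ===== CLAIM (what is proved, stated in full; the proofs are below) =====
def Claim_equal_select_connectors_py : Prop := ∀ (gebruiker_type : String) (vraag_type : Option String), Dom_select_connectors_py gebruiker_type vraag_type → Spec_select_connectors_py gebruiker_type vraag_type (select_connectors_py gebruiker_type vraag_type)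

-- ===== LEMMAS AND PROOFS =====

-- A's dict lookup with the "anders" default agrees with B's if-chain on every string
theorem pv_priority_lookup (g : String) :
    PySem.Dict.getD pvTypePriority g (PySem.Dict.getD pvTypePriority "anders" [])
      = pvPriorityOrder g := by
  have hitems : pvTypePriority.items =
      [("patient",      ["kanker_nl", "nkr_cijfers", "publications", "cancer_atlas"]),
       ("publiek",      ["kanker_nl", "nkr_cijfers", "publications", "cancer_atlas"]),
       ("zorgverlener", ["nkr_cijfers", "publications", "kanker_nl", "cancer_atlas"]),
       ("student",      ["publications", "nkr_cijfers", "kanker_nl", "cancer_atlas"]),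
       ("onderzoeker",  ["publications", "nkr_cijfers", "kanker_nl", "cancer_atlas"]),
       ("beleidsmaker", ["cancer_atlas", "nkr_cijfers", "publications", "kanker_nl"]),
       ("journalist",   ["kanker_nl", "nkr_cijfers", "cancer_atlas", "publications"]),
       ("anders",       ["kanker_nl", "nkr_cijfers", "cancer_atlas", "publications"])] := by rfl
  simp only [pvPriorityOrder, PySem.Dict.getD_eq_get?_getD, PySem.Dict.get?, hitems]
  by_cases h1 : "patient" = g <;> by_cases h2 : "publiek" = g <;>
  by_cases h3 : "zorgverlener" = g <;> by_cases h4 : "student" = g <;>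
  by_cases h5 : "onderzoeker" = g <;> by_cases h6 : "beleidsmaker" = g <;>
  by_cases h7 : "journalist" = g <;> by_cases h8 : "anders" = g <;>
  subst_vars <;> simp_all [List.find?, beq_eq_decide, eq_comm]

-- same for the question-type dict against B's if-chain
theorem pv_relevant_lookup (k : String) :
    PySem.Dict.getD pvVraagTypeConnectors k (PySem.Dict.getD pvVraagTypeConnectors "breed" [])
      = pvRelevantConnectors k := by
  have hitems : pvVraagTypeConnectors.items =
      [("patient_info", PySem.Set.ofList ["kanker_nl", "publications"]),
       ("cijfers",      PySem.Set.ofList ["nkr_cijfers", "kanker_nl"]),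
       ("regionaal",    PySem.Set.ofList ["cancer_atlas", "nkr_cijfers"]),
       ("onderzoek",    PySem.Set.ofList ["publications", "kanker_nl", "nkr_cijfers"]),
       ("breed",        PySem.Set.ofList ["kanker_nl", "nkr_cijfers", "cancer_atlas", "publications"])] := by rfl
  simp only [pvRelevantConnectors, PySem.Dict.getD_eq_get?_getD, PySem.Dict.get?, hitems]
  by_cases h1 : "patient_info" = k <;> by_cases h2 : "cijfers" = k <;>
  by_cases h3 : "regionaal" = k <;> by_cases h4 : "onderzoek" = k <;>
  by_cases h5 : "breed" = k <;>
  subst_vars <;> simp_all [List.find?, beq_eq_decide, eq_comm]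

-- the finite core: for every priority order and relevant set that can arise,
-- A's filter (plus its never-appending loop) equals B's sort-by-rank
theorem pv_core (g k : String) :
    (pvRelevantConnectors k).foldl (fun acc c => if acc.contains c then acc else acc ++ [c])
        ((pvPriorityOrder g).filter (fun c => (pvRelevantConnectors k).contains c))
      = PySem.List.sorted (pvRelevantConnectors k)
          (fun c => (PySem.List.index? (pvPriorityOrder g) c).getD (pvPriorityOrder g).length)
          false := by
  unfold pvPriorityOrder pvRelevantConnectors
  split_ifs <;> decide

-- ===== VERDICT (by name: the statement is the Claim_ definition above) =====
theorem select_connectors_py_spec : Claim_equal_select_connectors_py := by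
  intro g v _
  unfold Spec_select_connectors_py select_connectors_py select_connectors_py_alt
  simp only [pv_priority_lookup, pv_relevant_lookup]
  exact pv_core g _
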